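-- pv_equiv track=rewrite | github.com/ndtands/Algorithm_and_data_structer | DataStructAndalgorithm/Lab3/Lab3_2.py | Count
-- ===== SOURCE A (Python) =====
-- def Count(a,left,right,key):
--     if(left==right):
--         if(a[left]==key):
--             return 1
--         else:
--             return 0
--     else:
--         mid =(left+right)//2
--         return Count(a,left,mid,key)+Count(a,mid+1,right,key)
-- ===== SOURCE B (Python) =====
-- def Count(a, left, right, key):
--     total = 0
--     i = left
--     while True:
--         if a[i] == key:
--             total += 1
--         if i == right:
--             break
--         i += 1
--     return total
-- ===== Notes on version B (the rewrite author's own statement) =====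
-- stated objective: simpler
-- what changed: Replaces the midpoint divide-and-conquer recursion (split the range, add the two counts) by a single iterative linear scan with an accumulator.
import Mathlib
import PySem

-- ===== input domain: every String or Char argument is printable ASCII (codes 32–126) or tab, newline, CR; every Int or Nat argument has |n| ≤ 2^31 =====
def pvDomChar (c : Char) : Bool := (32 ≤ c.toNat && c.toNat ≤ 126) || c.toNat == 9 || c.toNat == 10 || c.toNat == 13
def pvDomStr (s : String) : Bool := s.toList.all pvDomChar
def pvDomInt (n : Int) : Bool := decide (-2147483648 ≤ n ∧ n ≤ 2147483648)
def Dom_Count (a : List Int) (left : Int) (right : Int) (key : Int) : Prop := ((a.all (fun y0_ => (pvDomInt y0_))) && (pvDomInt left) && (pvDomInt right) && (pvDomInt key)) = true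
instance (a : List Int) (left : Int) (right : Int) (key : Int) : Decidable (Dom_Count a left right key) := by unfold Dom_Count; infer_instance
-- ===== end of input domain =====

-- ===== PORT A =====
-- B replaces A's midpoint divide-and-conquer recursion by one linear counting loop; return values agree on every valid range.
-- Fuel (right-left).toNat+1 suffices: each recursive call strictly shrinks right-left (fuel is only a totality guard).
def CountFuel (a : List Int) (key : Int) : Nat → Int → Int → Int
  | 0, _, _ => 0
  | n+1, left, right =>
    if left == right then
      (if PySem.List.pyGetD a left 0 == key then 1 else 0)
    else
      let mid := PySem.Int.floordiv (left + right) 2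
      CountFuel a key n left mid + CountFuel a key n (mid + 1) right

def Count (a : List Int) (left : Int) (right : Int) (key : Int) : Int :=
  CountFuel a key ((right - left).toNat + 1) left right

-- ===== PORT B =====
-- The while-True loop of Source B: check a[i], break when i == right, else i += 1.  a[i] out of range is
-- Python's IndexError (pyGet? = none): the loop stops there, outside Pre_.  Fuel only guards totality:
-- (right-left).toNat+1 is the exact number of iterations on any input admitted by Pre_.
def CountAltGo (a : List Int) (right : Int) (key : Int) : Nat → Int → Int → Int
  | 0, _, total => total
  | n+1, i, total =>
    match PySem.List.pyGet? a i with
    | none => total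
    | some v =>
      let total' := if v == key then total + 1 else total
      if i == right then total' else CountAltGo a right key n (i + 1) total'

def Count_alt (a : List Int) (left : Int) (right : Int) (key : Int) : Int :=
  CountAltGo a right key ((right - left).toNat + 1) left 0

-- ===== PRECONDITION & SPEC =====
-- Pre_ excludes exactly the inputs where the Python A does not return: left > right (infinite recursion)
-- and ranges containing an index outside [-len(a), len(a)) (IndexError); B raises there too.
def Pre_Count (a : List Int) (left : Int) (right : Int) (key : Int) : Prop :=
  left ≤ right ∧ -(a.length : Int) ≤ left ∧ right < (a.length : Int)
instance (a : List Int) (left : Int) (right : Int) (key : Int) : Decidable (Pre_Count a left right key) := by unfold Pre_Count; infer_instance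

def pvWitness_Count : List Int × Int × Int × Int := ([1, 2, 1, 3], 0, 3, 1)

def Spec_Count (a : List Int) (left : Int) (right : Int) (key : Int) (out : Int) : Prop := out = Count_alt a left right key
instance (a : List Int) (left : Int) (right : Int) (key : Int) (out : Int) : Decidable (Spec_Count a left right key out) := by unfold Spec_Count; infer_instance

-- ===== CLAIM (what is proved, stated in full; the proofs are below) =====
def Claim_equal_Count : Prop := ∀ (a : List Int) (left : Int) (right : Int) (key : Int), Dom_Count a left right key → Pre_Count a left right key → Spec_Count a left right key (Count a left right key)

-- ===== LEMMAS AND PROOFS =====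

-- With enough fuel, A's recursion counts the key over [left, right] exactly like countP over the range.
lemma countFuel_eq_countP (a : List Int) (key : Int) :
    ∀ (n : Nat) (left right : Int), left ≤ right → (right - left).toNat < n →
      CountFuel a key n left right
        = (((PySem.List.pyRange left (right + 1) 1).countP
            (fun i => PySem.List.pyGetD a i 0 == key) : Nat) : Int) := by
  intro n
  induction n with
  | zero => intro left right _ h; omega
  | succ n ih =>
    intro left right hle hfuel
    by_cases heq : left = right
    · subst heq
      simp [CountFuel, PySem.List.pyRange_one_singleton, List.countP_cons]
    · have hlt : left < right := lt_of_le_of_ne hle heq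
      have hmid : PySem.Int.floordiv (left + right) 2 = (left + right) / 2 :=
        PySem.Int.floordiv_eq_ediv_of_pos (by omega)
      have hb1 : left ≤ PySem.Int.floordiv (left + right) 2 := by rw [hmid]; omega
      have hb2 : PySem.Int.floordiv (left + right) 2 < right := by rw [hmid]; omega
      set mid := PySem.Int.floordiv (left + right) 2 with hmiddef
      have h1 := ih left mid hb1 (by omega)
      have h2 := ih (mid + 1) right (by omega) (by omega)
      have hsplit : PySem.List.pyRange left (right + 1) 1
          = PySem.List.pyRange left (mid + 1) 1 ++ PySem.List.pyRange (mid + 1) (right + 1) 1 :=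
        PySem.List.pyRange_one_append left (mid + 1) (right + 1) (by omega) (by omega)
      have : CountFuel a key (n + 1) left right
          = CountFuel a key n left mid + CountFuel a key n (mid + 1) right := by
        simp [CountFuel, heq]
        rw [← hmid]
      rw [this, h1, h2, hsplit, List.countP_append]
      push_cast
      ring

-- B's loop, from position i with enough fuel, adds to the accumulator the count of key over [i, right].
lemma countAltGo_eq_countP (a : List Int) (right key : Int)
    (hlen : right < (a.length : Int)) :
    ∀ (n : Nat) (i total : Int), i ≤ right → -(a.length : Int) ≤ i → (right - i).toNat < n →
      CountAltGo a right key n i total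
        = total + (((PySem.List.pyRange i (right + 1) 1).countP
            (fun j => PySem.List.pyGetD a j 0 == key) : Nat) : Int) := by
  intro n
  induction n with
  | zero => intro i total _ _ h; omega
  | succ n ih =>
    intro i total hir hlo hfuel
    have hin : PySem.Raise.InRange a.length i := by
      simp [PySem.Raise.InRange]; omega
    obtain ⟨v, hv⟩ : ∃ v, PySem.List.pyGet? a i = some v := by
      cases hx : PySem.List.pyGet? a i with
      | none => rw [PySem.List.pyGet?_eq_none_iff] at hx; exact absurd hin hx
      | some v => exact ⟨v, rfl⟩
    have hgd : PySem.List.pyGetD a i 0 = v := by simp [PySem.List.pyGetD, hv]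
    have hcons : PySem.List.pyRange i (right + 1) 1
        = i :: PySem.List.pyRange (i + 1) (right + 1) 1 :=
      PySem.List.pyRange_one_cons (by omega)
    by_cases heq : i = right
    · subst heq
      have hnil : PySem.List.pyRange (i + 1) (i + 1) 1 = [] :=
        PySem.List.pyRange_one_eq_nil (by omega)
      simp [CountAltGo, hv, hcons, hnil, List.countP_cons, hgd]
      split_ifs <;> ring
    · have hlt : i < right := lt_of_le_of_ne hir heq
      have : CountAltGo a right key (n + 1) i total
          = CountAltGo a right key n (i + 1) (if v == key then total + 1 else total) := by
        simp [CountAltGo, hv, heq]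
      rw [this, ih (i + 1) _ (by omega) (by omega) (by omega), hcons, List.countP_cons, hgd]
      by_cases hp : v == key <;> simp [hp] <;> push_cast <;> ring

-- ===== VERDICT (by name: the statement is the Claim_ definition above) =====
theorem Count_spec : Claim_equal_Count := by
  intro a left right key _ hpre
  obtain ⟨h1, h2, h3⟩ := hpre
  unfold Spec_Count Count Count_alt
  rw [countFuel_eq_countP a key ((right - left).toNat + 1) left right h1 (by omega),
    countAltGo_eq_countP a right key h3 ((right - left).toNat + 1) left 0 h1 h2 (by omega)]
  ring
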